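-- pv_equiv track=rewrite | github.com/younis-ali/fast-code | app/workspace/runtime.py | _score_tokens
-- ===== SOURCE A (Python) =====
-- def _score_tokens(tokens: set[str], parts: list[str]) -> int:
--     score = 0
--     for p in parts:
--         pl = p.lower().strip("{}")
--         if pl and pl in tokens:
--             score += 2
--         for tok in tokens:
--             if len(tok) > 2 and tok in pl:
--                 score += 1
--     return score
-- ===== SOURCE B (Python) =====
-- def _score_tokens(tokens: set[str], parts: list[str]) -> int:
--     # Index the long tokens by their lengths once; then for each normalized part,
--     # scan its positions and probe only substrings whose length is a token length,
--     # collecting the distinct long tokens that occur (set lookups instead of a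
--     # per-token containment scan).
--     long_toks = {t for t in tokens if len(t) > 2}
--     lengths = {len(t) for t in long_toks}
--     score = 0
--     for p in parts:
--         pl = p.lower().strip("{}")
--         if pl and pl in tokens:
--             score += 2
--         matched = set()
--         for i in range(len(pl)):
--             for L in lengths:
--                 sub = pl[i:i+L]
--                 if len(sub) == L and sub in long_toks:
--                     matched.add(sub)
--         score += len(matched)
--     return score
-- ===== Notes on version B (the rewrite author's own statement) =====
-- stated objective: faster
-- what changed: B replaces A's per-part scan over every token with a substring-probing search: it buckets the long tokens and their lengths into hash sets once, then for each normalized part walks its character positions, slices out only substrings whose length is a token length, and collects the distinct long tokens found in a set whose size is the part's substring score.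
import Mathlib
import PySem

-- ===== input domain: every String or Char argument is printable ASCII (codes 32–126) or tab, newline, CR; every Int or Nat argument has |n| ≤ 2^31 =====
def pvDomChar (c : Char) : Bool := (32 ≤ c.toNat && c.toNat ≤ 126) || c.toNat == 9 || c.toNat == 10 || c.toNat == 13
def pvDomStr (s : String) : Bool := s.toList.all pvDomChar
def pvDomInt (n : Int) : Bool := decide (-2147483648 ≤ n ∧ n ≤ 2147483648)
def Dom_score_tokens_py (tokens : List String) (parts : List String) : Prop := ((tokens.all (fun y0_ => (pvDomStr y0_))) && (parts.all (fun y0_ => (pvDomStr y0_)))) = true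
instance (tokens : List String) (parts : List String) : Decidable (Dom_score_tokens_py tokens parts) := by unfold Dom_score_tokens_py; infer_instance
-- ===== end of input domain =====

-- B replaces A's per-part scan over all tokens by a substring-probing search: long tokens and their
-- lengths are indexed into sets once, each normalized part is scanned position by position probing
-- only substrings of token lengths, and the distinct matches collected in a set give the score
-- (objective: faster — measured faster in a timing run; same result on token lists without duplicates).


-- ===== PORT A =====
def score_tokens_py (tokens : List String) (parts : List String) : Int :=
  parts.foldl (fun score p =>
    let pl := PySem.Str.stripChars (PySem.Str.lower p) "{}"
    let score := if (PySem.Str.len pl != 0) && PySem.Set.contains tokens pl then score + 2 else score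
    tokens.foldl (fun s tok =>
      if decide (2 < PySem.Str.len tok) && PySem.Str.isIn tok pl then s + 1 else s) score) 0

-- ===== PORT B =====
def score_tokens_py_alt (tokens : List String) (parts : List String) : Int :=
  let longToks : PySem.Set String := tokens.filter (fun t => decide (2 < PySem.Str.len t))
  let lengths : PySem.Set Int := PySem.Set.ofList (longToks.map (fun t => PySem.Str.len t))
  parts.foldl (fun score p =>
    let pl := PySem.Str.stripChars (PySem.Str.lower p) "{}"
    let score := if (PySem.Str.len pl != 0) && PySem.Set.contains tokens pl then score + 2 else score
    let matched : PySem.Set String :=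
      (PySem.List.pyRange 0 (PySem.Str.len pl) 1).foldl (fun m i =>
        lengths.foldl (fun m L =>
          let sub := PySem.Str.slice pl (some i) (some (i + L))
          if (PySem.Str.len sub == L) && PySem.Set.contains longToks sub
          then PySem.Set.add m sub else m) m) PySem.Set.empty
    score + PySem.Set.len matched) 0

-- ===== PRECONDITION & SPEC =====
-- Pre_ restricts tokens to lists without duplicate elements: the Python parameter is a set, and a
-- list with duplicates does not represent any Python set (A would count a duplicated token twice).
def Pre_score_tokens_py (tokens : List String) (parts : List String) : Prop := tokens.Nodup
instance (tokens : List String) (parts : List String) : Decidable (Pre_score_tokens_py tokens parts) := by unfold Pre_score_tokens_py; infer_instance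
def pvWitness_score_tokens_py : List String × List String := (["abc", "x"], ["ABCd", "{x}"])
def Spec_score_tokens_py (tokens : List String) (parts : List String) (out : Int) : Prop := out = score_tokens_py_alt tokens parts
instance (tokens : List String) (parts : List String) (out : Int) : Decidable (Spec_score_tokens_py tokens parts out) := by unfold Spec_score_tokens_py; infer_instance

-- ===== CLAIM (what is proved, stated in full; the proofs are below) =====
def Claim_equal_score_tokens_py : Prop := ∀ (tokens : List String) (parts : List String), Dom_score_tokens_py tokens parts → Pre_score_tokens_py tokens parts → Spec_score_tokens_py tokens parts (score_tokens_py tokens parts)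

-- ===== LEMMAS AND PROOFS =====

-- membership in a fold of conditional set-adds
theorem pv_mem_foldl_add {α β : Type} [DecidableEq α] (l : List β) (c : β → Bool) (f : β → α)
    (acc : List α) (x : α) :
    (x ∈ l.foldl (fun m y => if c y then PySem.Set.add m (f y) else m) acc) ↔
      x ∈ acc ∨ ∃ y ∈ l, c y = true ∧ x = f y := by
  induction l generalizing acc with
  | nil => simp
  | cons y ys ih =>
      simp only [List.foldl_cons]
      by_cases h : c y = true
      · rw [if_pos h, ih]
        simp only [PySem.Set.mem_add, List.mem_cons]
        aesop
      · rw [if_neg h, ih]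
        simp only [List.mem_cons]
        aesop

-- a fold of conditional set-adds preserves Nodup
theorem pv_nodup_foldl_add {α β : Type} [DecidableEq α] (l : List β) (c : β → Bool) (f : β → α)
    (acc : List α) (h : acc.Nodup) :
    (l.foldl (fun m y => if c y then PySem.Set.add m (f y) else m) acc).Nodup := by
  induction l generalizing acc with
  | nil => exact h
  | cons y ys ih =>
      simp only [List.foldl_cons]
      split
      · exact ih _ (PySem.Set.nodup_add _ _ h)
      · exact ih _ h

-- membership in the nested double fold of conditional set-adds
theorem pv_mem_foldl_add2 {α β γ : Type} [DecidableEq α] (l1 : List β) (l2 : List γ)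
    (c : β → γ → Bool) (f : β → γ → α) (acc : List α) (x : α) :
    (x ∈ l1.foldl (fun m y => l2.foldl (fun m z => if c y z then PySem.Set.add m (f y z) else m) m) acc) ↔
      x ∈ acc ∨ ∃ y ∈ l1, ∃ z ∈ l2, c y z = true ∧ x = f y z := by
  induction l1 generalizing acc with
  | nil => simp
  | cons y ys ih =>
      simp only [List.foldl_cons, ih, pv_mem_foldl_add, List.mem_cons]
      aesop

-- the nested double fold preserves Nodup
theorem pv_nodup_foldl_add2 {α β γ : Type} [DecidableEq α] (l1 : List β) (l2 : List γ)
    (c : β → γ → Bool) (f : β → γ → α) (acc : List α) (h : acc.Nodup) :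
    (l1.foldl (fun m y => l2.foldl (fun m z => if c y z then PySem.Set.add m (f y z) else m) m) acc).Nodup := by
  induction l1 generalizing acc with
  | nil => exact h
  | cons y ys ih =>
      simp only [List.foldl_cons]
      exact ih _ (pv_nodup_foldl_add _ _ _ _ h)

-- a slice with non-negative bounds is an infix
theorem pv_slice_infix (l : List Char) (a b : Int) (ha : 0 ≤ a) (hb : 0 ≤ b) :
    PySem.List.slice l (some a) (some b) <:+: l := by
  rw [PySem.List.slice_toNat l ha hb]
  exact (List.take_prefix _ _).isInfix.trans (List.drop_suffix _ _).isInfix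

-- the matched set of B collects exactly the long tokens occurring in pl
theorem pv_mem_matched (tokens : List String) (pl : String) (x : String) :
    (x ∈ (PySem.List.pyRange 0 (PySem.Str.len pl) 1).foldl (fun m i =>
        (PySem.Set.ofList ((tokens.filter (fun t => decide (2 < PySem.Str.len t))).map
            (fun t => PySem.Str.len t))).foldl (fun m L =>
          if (PySem.Str.len (PySem.Str.slice pl (some i) (some (i + L))) == L) &&
              PySem.Set.contains (tokens.filter (fun t => decide (2 < PySem.Str.len t)))
                (PySem.Str.slice pl (some i) (some (i + L)))
          then PySem.Set.add m (PySem.Str.slice pl (some i) (some (i + L))) else m) m)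
        (PySem.Set.empty : PySem.Set String)) ↔
      x ∈ tokens ∧ 2 < PySem.Str.len x ∧ PySem.Str.isIn x pl = true := by
  rw [pv_mem_foldl_add2 (PySem.List.pyRange 0 (PySem.Str.len pl) 1)
        (PySem.Set.ofList ((tokens.filter (fun t => decide (2 < PySem.Str.len t))).map
            (fun t => PySem.Str.len t)))
        (fun i L => (PySem.Str.len (PySem.Str.slice pl (some i) (some (i + L))) == L) &&
              PySem.Set.contains (tokens.filter (fun t => decide (2 < PySem.Str.len t)))
                (PySem.Str.slice pl (some i) (some (i + L))))
        (fun i L => PySem.Str.slice pl (some i) (some (i + L)))]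
  constructor
  · rintro (h | ⟨i, hi, L, hL, hc, rfl⟩)
    · simp [PySem.Set.empty] at h
    · rw [Bool.and_eq_true] at hc
      have hmem := (PySem.Set.contains_iff _ _).mp hc.2
      rw [List.mem_filter] at hmem
      refine ⟨hmem.1, by simpa using hmem.2, ?_⟩
      -- the slice is an infix of pl
      have hi0 : 0 ≤ i := (PySem.List.mem_pyRange_one.mp hi).1
      rw [PySem.Set.mem_ofList, List.mem_map] at hL
      obtain ⟨t, ht, rfl⟩ := hL
      have htl : 2 < PySem.Str.len t := by
        have := (List.mem_filter.mp ht).2; simpa using this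
      rw [PySem.Str.isIn_iff_infix, PySem.Str.toList_slice, PySem.Chars.slice_eq_listSlice]
      exact pv_slice_infix _ _ _ hi0 (by omega)
  · rintro ⟨hx, h2, hin⟩
    right
    rw [PySem.Str.isIn_iff_infix] at hin
    obtain ⟨s1, s2, heq⟩ := hin
    -- position j = |s1|, length n = |x|
    refine ⟨(s1.length : Int), ?_, (x.toList.length : Int), ?_, ?_⟩
    · rw [PySem.List.mem_pyRange_one]
      have hlen : PySem.Str.len pl = (pl.toList.length : Int) := by simp [PySem.Str.len_eq]
      have hx3 : 2 < (x.toList.length : Int) := by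
        have : PySem.Str.len x = (x.toList.length : Int) := by simp [PySem.Str.len_eq]
        omega
      have : pl.toList.length = s1.length + x.toList.length + s2.length := by
        rw [← heq]; simp; omega
      constructor
      · positivity
      · rw [hlen]; omega
    · rw [PySem.Set.mem_ofList, List.mem_map]
      refine ⟨x, ?_, by simp [PySem.Str.len_eq]⟩
      rw [List.mem_filter]
      exact ⟨hx, by simpa using h2⟩
    · have hsub : PySem.Str.slice pl (some (s1.length : Int))
          (some ((s1.length : Int) + (x.toList.length : Int))) = x := by
        rw [← String.toList_inj, PySem.Str.toList_slice, PySem.Chars.slice_eq_listSlice,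
          PySem.List.slice_natCast_add, ← heq]
        rw [List.append_assoc, List.drop_left, List.take_left]
      rw [hsub]
      refine ⟨?_, rfl⟩
      rw [Bool.and_eq_true]
      constructor
      · simp [PySem.Str.len_eq]
      · rw [PySem.Set.contains_iff, List.mem_filter]
        exact ⟨hx, by simpa using h2⟩

-- per-part agreement: B's matched-set size is A's per-part substring count
theorem pv_body_eq (tokens : List String) (hnd : tokens.Nodup) (pl : String) :
    ((PySem.List.pyRange 0 (PySem.Str.len pl) 1).foldl (fun m i =>
        (PySem.Set.ofList ((tokens.filter (fun t => decide (2 < PySem.Str.len t))).map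
            (fun t => PySem.Str.len t))).foldl (fun m L =>
          if (PySem.Str.len (PySem.Str.slice pl (some i) (some (i + L))) == L) &&
              PySem.Set.contains (tokens.filter (fun t => decide (2 < PySem.Str.len t)))
                (PySem.Str.slice pl (some i) (some (i + L)))
          then PySem.Set.add m (PySem.Str.slice pl (some i) (some (i + L))) else m) m)
        (PySem.Set.empty : PySem.Set String)).length
      = tokens.countP (fun tok => decide (2 < PySem.Str.len tok) && PySem.Str.isIn tok pl) := by
  have hnodup :=
    pv_nodup_foldl_add2 (PySem.List.pyRange 0 (PySem.Str.len pl) 1)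
      (PySem.Set.ofList ((tokens.filter (fun t => decide (2 < PySem.Str.len t))).map
            (fun t => PySem.Str.len t)))
      (fun i L => (PySem.Str.len (PySem.Str.slice pl (some i) (some (i + L))) == L) &&
              PySem.Set.contains (tokens.filter (fun t => decide (2 < PySem.Str.len t)))
                (PySem.Str.slice pl (some i) (some (i + L))))
      (fun i L => PySem.Str.slice pl (some i) (some (i + L))) PySem.Set.empty List.nodup_nil
  have hfil : (tokens.filter (fun tok => decide (2 < PySem.Str.len tok) && PySem.Str.isIn tok pl)).Nodup :=
    hnd.filter _
  rw [List.countP_eq_length_filter]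
  exact ((List.perm_ext_iff_of_nodup hnodup hfil).mpr (by
    intro a
    rw [pv_mem_matched, List.mem_filter]
    simp)).length_eq

-- ===== VERDICT (by name: the statement is the Claim_ definition above) =====
theorem score_tokens_py_spec : Claim_equal_score_tokens_py := by
  intro tokens parts _ hpre
  show score_tokens_py tokens parts = score_tokens_py_alt tokens parts
  unfold score_tokens_py score_tokens_py_alt
  apply List.foldl_ext
  intro score p _
  simp only [PySem.List.foldl_if_add_one, PySem.Set.len]
  rw [pv_body_eq tokens hpre]
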